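-- pv_equiv track=rewrite | github.com/albertwcheng/albert-bioinformatics-scripts | compareLists.py | getOverlapLists
-- ===== SOURCE A (Python) =====
-- def getOverlapLists(list1,list2):
-- 	list1copy=list1[:]
-- 	list2copy=list2[:]
-- 	intersect=[]
-- 	list1spec=[]
-- 	list2spec=[]
-- 	#print list1
-- 	#print list2
-- 	for x in list1copy:
-- 		#indices=indexAll(list2copy,x)
-- 		try:
-- 			i2=list2copy.index(x)
-- 			intersect.append(x)
-- 			#print >> stderr,"inserting intersect",x
-- 			#print >> stderr,"a remove",list2copy,i2
-- 			del list2copy[i2]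
-- 			#print >> stderr,"b"
-- 		except ValueError:
-- 			list1spec.append(x)
--
-- 	list2spec=list2copy
-- 	#union=intersect+list1spec+list2spec
--
-- 	return [intersect,list1spec,list2spec] #,union]
-- ===== SOURCE B (Python) =====
-- def getOverlapLists(list1, list2):
--     remaining = {}
--     for x in list2:
--         remaining[x] = remaining.get(x, 0) + 1
--     intersect = []
--     list1spec = []
--     used = {}
--     for x in list1:
--         if remaining.get(x, 0) > 0:
--             remaining[x] = remaining.get(x, 0) - 1
--             used[x] = used.get(x, 0) + 1
--             intersect.append(x)
--         else:
--             list1spec.append(x)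
--     list2spec = []
--     for x in list2:
--         if used.get(x, 0) > 0:
--             used[x] = used.get(x, 0) - 1
--         else:
--             list2spec.append(x)
--     return [intersect, list1spec, list2spec]
-- ===== Notes on version B (the rewrite author's own statement) =====
-- stated objective: faster
-- what changed: Replaces the per-element list.index scan and in-place deletion on a copy of list2 with hash-counter bookkeeping: one pass builds a count of list2, one pass over list1 matches against it, and one pass over list2 emits the unmatched occurrences.
import Mathlib
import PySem

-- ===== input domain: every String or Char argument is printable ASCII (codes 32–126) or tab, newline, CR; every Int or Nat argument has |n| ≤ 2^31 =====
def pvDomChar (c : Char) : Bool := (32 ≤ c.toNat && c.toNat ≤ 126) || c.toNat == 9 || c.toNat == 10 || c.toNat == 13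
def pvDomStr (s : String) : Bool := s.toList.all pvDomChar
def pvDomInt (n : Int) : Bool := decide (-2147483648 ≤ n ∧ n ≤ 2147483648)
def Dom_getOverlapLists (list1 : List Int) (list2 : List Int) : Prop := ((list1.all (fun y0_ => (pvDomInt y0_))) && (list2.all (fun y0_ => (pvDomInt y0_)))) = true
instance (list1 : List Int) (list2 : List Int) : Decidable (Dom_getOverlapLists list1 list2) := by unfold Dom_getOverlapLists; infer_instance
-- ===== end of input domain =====

-- B replaces A's per-element list.index scan + in-place deletion with counter dictionaries
-- built in single passes (objective: faster, asymptotic).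

-- ===== PORT A =====
-- A's loop over list1copy: state is (list2copy, intersect, list1spec);
-- 'try: i2 = list2copy.index(x) … del list2copy[i2] … except ValueError' is the
-- match on PySem.List.index?.
def getOverlapLists (list1 : List Int) (list2 : List Int) : List (List Int) :=
  let st := list1.foldl
    (fun (st : List Int × List Int × List Int) x =>
      match PySem.List.index? st.1 x with
      | some i2 => (st.1.eraseIdx i2, st.2.1 ++ [x], st.2.2)
      | none    => (st.1, st.2.1, st.2.2 ++ [x]))
    (list2, [], [])
  [st.2.1, st.2.2, st.1]

-- ===== PORT B =====
-- B's three loops: build 'remaining' counter from list2; match list1 against it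
-- building intersect/list1spec/used; then emit list2spec from list2 and used.
def getOverlapLists_alt (list1 : List Int) (list2 : List Int) : List (List Int) :=
  let remaining := list2.foldl
    (fun (d : PySem.Dict Int Int) x => d.insert x (d.getD x 0 + 1)) PySem.Dict.empty
  let st := list1.foldl
    (fun (st : PySem.Dict Int Int × List Int × List Int × PySem.Dict Int Int) x =>
      if 0 < st.1.getD x 0 then
        (st.1.insert x (st.1.getD x 0 - 1), st.2.1 ++ [x], st.2.2.1,
         st.2.2.2.insert x (st.2.2.2.getD x 0 + 1))
      else
        (st.1, st.2.1, st.2.2.1 ++ [x], st.2.2.2))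
    (remaining, [], [], PySem.Dict.empty)
  let st2 := list2.foldl
    (fun (p : PySem.Dict Int Int × List Int) x =>
      if 0 < p.1.getD x 0 then (p.1.insert x (p.1.getD x 0 - 1), p.2)
      else (p.1, p.2 ++ [x]))
    (st.2.2.2, [])
  [st.2.1, st.2.2.1, st2.2]

-- ===== PRECONDITION & SPEC =====
def Spec_getOverlapLists (list1 : List Int) (list2 : List Int) (out : List (List Int)) : Prop := out = getOverlapLists_alt list1 list2
instance (list1 : List Int) (list2 : List Int) (out : List (List Int)) : Decidable (Spec_getOverlapLists list1 list2 out) := by unfold Spec_getOverlapLists; infer_instance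

-- ===== CLAIM (what is proved, stated in full; the proofs are below) =====
def Claim_equal_getOverlapLists : Prop := ∀ (list1 : List Int) (list2 : List Int), Dom_getOverlapLists list1 list2 → Spec_getOverlapLists list1 list2 (getOverlapLists list1 list2)

-- ===== LEMMAS AND PROOFS =====

def upd (f : Int → Int) (x d : Int) : Int → Int := fun v => if v = x then d else f v

-- Functional model of B's third loop: drop the first (f v) occurrences of each value v.
def funPass2 (f : Int → Int) : List Int → List Int
  | [] => []
  | x :: t =>
    if 0 < f x then funPass2 (upd f x (f x - 1)) t
    else x :: funPass2 f t

theorem funPass2_congr {f g : Int → Int} (l : List Int) (h : ∀ v, f v = g v) :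
    funPass2 f l = funPass2 g l := by
  have : f = g := funext h
  rw [this]

theorem funPass2_cons_pos (f : Int → Int) (x : Int) (t : List Int) (h : 0 < f x) :
    funPass2 f (x :: t) = funPass2 (upd f x (f x - 1)) t := by
  simp [funPass2, h]

theorem funPass2_cons_neg (f : Int → Int) (x : Int) (t : List Int) (h : ¬ 0 < f x) :
    funPass2 f (x :: t) = x :: funPass2 f t := by
  simp [funPass2, h]

theorem funPass2_nonpos (f : Int → Int) (l : List Int) (h : ∀ v, f v ≤ 0) :
    funPass2 f l = l := by
  induction l with
  | nil => rfl
  | cons x t ih =>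
    rw [funPass2_cons_neg f x t (by have := h x; omega), ih]

-- B's third loop computes acc ++ funPass2 (getD used) list2.
theorem pass2_dict_eq (l : List Int) (used : PySem.Dict Int Int) (acc : List Int) :
    (l.foldl (fun (p : PySem.Dict Int Int × List Int) x =>
      if 0 < p.1.getD x 0 then (p.1.insert x (p.1.getD x 0 - 1), p.2)
      else (p.1, p.2 ++ [x])) (used, acc)).2
    = acc ++ funPass2 (fun v => used.getD v 0) l := by
  induction l generalizing used acc with
  | nil => simp [funPass2]
  | cons x t ih =>
    by_cases h : 0 < used.getD x 0
    · rw [List.foldl_cons]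
      simp only [if_pos h]
      rw [ih, funPass2_cons_pos (fun v => used.getD v 0) x t h]
      congr 1
      apply funPass2_congr
      intro v
      rw [PySem.Dict.getD_insert, upd]
    · rw [List.foldl_cons]
      simp only [if_neg h]
      rw [ih, funPass2_cons_neg (fun v => used.getD v 0) x t h]
      simp

-- Erasing the first occurrence of x from funPass2 f l = incrementing f at x.
theorem funPass2_erase (l : List Int) (f : Int → Int) (x : Int)
    (hf : ∀ v, 0 ≤ f v) (hm : x ∈ funPass2 f l) :
    (funPass2 f l).erase x = funPass2 (upd f x (f x + 1)) l := by
  induction l generalizing f with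
  | nil => simp [funPass2] at hm
  | cons y t ih =>
    by_cases hy : 0 < f y
    · -- y is skipped on both sides
      have hy' : 0 < (upd f x (f x + 1)) y := by
        unfold upd
        split
        · next h => subst h; omega
        · exact hy
      rw [funPass2_cons_pos f y t hy] at hm ⊢
      rw [funPass2_cons_pos _ y t hy']
      have hg : ∀ v, 0 ≤ (upd f y (f y - 1)) v := by
        intro v; unfold upd; split <;> [omega; exact hf v]
      rw [ih (upd f y (f y - 1)) hg hm]
      apply funPass2_congr
      intro v
      unfold upd
      by_cases h1 : v = x <;> by_cases h2 : v = y <;> simp [h1, h2] <;> simp_all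
    · -- y is kept by f
      have hy0 : f y = 0 := le_antisymm (by omega) (hf y)
      by_cases hyx : y = x
      · subst hyx
        have hy' : 0 < (upd f y (f y + 1)) y := by unfold upd; simp; omega
        rw [funPass2_cons_neg f y t hy, funPass2_cons_pos _ y t hy', List.erase_cons_head]
        apply funPass2_congr
        intro v
        unfold upd
        by_cases h : v = y <;> simp [h]
      · have hy' : ¬ 0 < (upd f x (f x + 1)) y := by
          unfold upd; rw [if_neg hyx]; exact hy
        rw [funPass2_cons_neg f y t hy] at hm ⊢
        rw [funPass2_cons_neg _ y t hy']
        rw [List.erase_cons_tail (by simp [hyx])]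
        have hm' : x ∈ funPass2 f t := by
          rcases List.mem_cons.mp hm with h | h
          · exact absurd h.symm hyx
          · exact h
        rw [ih f hf hm']

-- The main loop invariant: A's state (l2c, inter, spec1) corresponds to B's state
-- (rem, inter, spec1, used) when rem counts l2c and l2c = funPass2 (getD used) list2.
theorem main_loop (l1 : List Int) (list2 : List Int)
    (l2c inter spec1 : List Int) (rem used : PySem.Dict Int Int)
    (h1 : ∀ v, rem.getD v 0 = (l2c.count v : Int))
    (h2 : l2c = funPass2 (fun v => used.getD v 0) list2)
    (h3 : ∀ v, 0 ≤ used.getD v 0) :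
    (let stA := l1.foldl
        (fun (st : List Int × List Int × List Int) x =>
          match PySem.List.index? st.1 x with
          | some i2 => (st.1.eraseIdx i2, st.2.1 ++ [x], st.2.2)
          | none    => (st.1, st.2.1, st.2.2 ++ [x]))
        (l2c, inter, spec1)
     let stB := l1.foldl
        (fun (st : PySem.Dict Int Int × List Int × List Int × PySem.Dict Int Int) x =>
          if 0 < st.1.getD x 0 then
            (st.1.insert x (st.1.getD x 0 - 1), st.2.1 ++ [x], st.2.2.1,
             st.2.2.2.insert x (st.2.2.2.getD x 0 + 1))
          else
            (st.1, st.2.1, st.2.2.1 ++ [x], st.2.2.2))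
        (rem, inter, spec1, used)
     stA.2.1 = stB.2.1 ∧ stA.2.2 = stB.2.2.1 ∧
       stA.1 = funPass2 (fun v => stB.2.2.2.getD v 0) list2) := by
  induction l1 generalizing l2c inter spec1 rem used with
  | nil => exact ⟨rfl, rfl, h2⟩
  | cons x t ih =>
    simp only [List.foldl_cons]
    by_cases hx : 0 < rem.getD x 0
    · -- x present in l2c
      have hcnt : 0 < l2c.count x := by have := h1 x; omega
      have hmem : x ∈ l2c := List.count_pos_iff.mp hcnt
      obtain ⟨i, hi⟩ := Option.isSome_iff_exists.mp ((PySem.List.index?_isSome_iff l2c x).mpr hmem)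
      have hstep : (match PySem.List.index? l2c x with
          | some i2 => (l2c.eraseIdx i2, inter ++ [x], spec1)
          | none    => (l2c, inter, spec1 ++ [x])) = (l2c.eraseIdx i, inter ++ [x], spec1) := by
        rw [hi]
      rw [hstep, if_pos hx]
      have herase : l2c.eraseIdx i = l2c.erase x := by
        obtain ⟨pre, suf, hsplit, hlen, hnot⟩ := (PySem.List.index?_eq_some_iff l2c x i).mp hi
        subst hsplit
        rw [List.erase_append_right _ (by simpa using hnot), List.erase_cons_head,
            ← hlen, List.eraseIdx_append_of_length_le (le_refl _)]
        simp
      rw [herase]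
      apply ih
      · intro v
        rw [PySem.Dict.getD_insert]
        by_cases hv : v = x
        · subst hv
          rw [if_pos rfl, h1 v, List.count_erase_self]
          omega
        · rw [if_neg hv, h1 v, List.count_erase_of_ne hv]
      · rw [h2, funPass2_erase list2 _ x h3 (h2 ▸ hmem)]
        apply funPass2_congr
        intro v
        rw [PySem.Dict.getD_insert, upd]
      · intro v
        rw [PySem.Dict.getD_insert]
        split
        · have := h3 x; omega
        · exact h3 v
    · -- x absent
      have hcnt : l2c.count x = 0 := by have := h1 x; omega
      have hmem : x ∉ l2c := by simpa using List.count_eq_zero.mp hcnt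
      have hstep : (match PySem.List.index? l2c x with
          | some i2 => (l2c.eraseIdx i2, inter ++ [x], spec1)
          | none    => (l2c, inter, spec1 ++ [x])) = (l2c, inter, spec1 ++ [x]) := by
        rw [(PySem.List.index?_eq_none_iff l2c x).mpr hmem]
      rw [hstep, if_neg hx]
      exact ih l2c inter (spec1 ++ [x]) rem used h1 h2 h3

-- ===== VERDICT (by name: the statement is the Claim_ definition above) =====
theorem getOverlapLists_spec : Claim_equal_getOverlapLists := by
  intro list1 list2 _
  unfold Spec_getOverlapLists getOverlapLists getOverlapLists_alt
  dsimp only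
  have hrem : ∀ v, (list2.foldl
      (fun (d : PySem.Dict Int Int) x => d.insert x (d.getD x 0 + 1)) PySem.Dict.empty).getD v 0
      = (list2.count v : Int) := by
    intro v
    rw [PySem.Dict.getD_foldl_insert_add_one]
    simp
  have h2 : list2 = funPass2 (fun v => (PySem.Dict.empty : PySem.Dict Int Int).getD v 0) list2 := by
    rw [funPass2_nonpos _ _ (by intro v; simp)]
  have h3 : ∀ v, 0 ≤ (PySem.Dict.empty : PySem.Dict Int Int).getD v 0 := by intro v; simp
  have := main_loop list1 list2 list2 [] []
    (list2.foldl (fun (d : PySem.Dict Int Int) x => d.insert x (d.getD x 0 + 1)) PySem.Dict.empty)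
    PySem.Dict.empty hrem h2 h3
  simp only at this
  obtain ⟨e1, e2, e3⟩ := this
  rw [pass2_dict_eq]
  simp only [List.nil_append]
  rw [e1, e2, e3]
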